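-- pv_equiv track=rewrite | github.com/javierchan/oci | inventory/src/oci_inventory/export/diagram_projections.py | _extract_scope_view
-- ===== SOURCE A (Python) =====
-- from typing import Any, Callable, Dict, Iterable, List, Mapping, Optional, Sequence, Set, Tuple
--
-- def _extract_scope_view(text: str) -> Tuple[str, str, str]:
--     scope = ""
--     view = ""
--     part = ""
--     for raw in text.splitlines():
--         line = raw.strip()
--         if line.startswith("%% Scope:"):
--             scope = line[len("%% Scope:") :].strip()
--         elif line.startswith("%% View:"):
--             view = line[len("%% View:") :].strip()
--         elif line.startswith("%% Part:"):
--             part = line[len("%% Part:") :].strip()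
--     return scope, view, part
-- ===== SOURCE B (Python) =====
-- def _extract_scope_view(text):
--     scope = None
--     view = None
--     part = None
--     for raw in reversed(text.splitlines()):
--         line = raw.strip()
--         if scope is None and line.startswith("%% Scope:"):
--             scope = line[9:].strip()
--         elif view is None and line.startswith("%% View:"):
--             view = line[8:].strip()
--         elif part is None and line.startswith("%% Part:"):
--             part = line[8:].strip()
--         if scope is not None and view is not None and part is not None:
--             break
--     return (scope if scope is not None else "",
--             view if view is not None else "",
--             part if part is not None else "")
-- ===== Notes on version B (the rewrite author's own statement) =====
-- stated objective: alternative
-- what changed: Scans the lines in reverse keeping the first match per field in None-initialized slots (so last-match-wins becomes first-match-wins) and breaks early once all three fields are captured, instead of A's forward pass that overwrites each field on every match.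
import Mathlib
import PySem

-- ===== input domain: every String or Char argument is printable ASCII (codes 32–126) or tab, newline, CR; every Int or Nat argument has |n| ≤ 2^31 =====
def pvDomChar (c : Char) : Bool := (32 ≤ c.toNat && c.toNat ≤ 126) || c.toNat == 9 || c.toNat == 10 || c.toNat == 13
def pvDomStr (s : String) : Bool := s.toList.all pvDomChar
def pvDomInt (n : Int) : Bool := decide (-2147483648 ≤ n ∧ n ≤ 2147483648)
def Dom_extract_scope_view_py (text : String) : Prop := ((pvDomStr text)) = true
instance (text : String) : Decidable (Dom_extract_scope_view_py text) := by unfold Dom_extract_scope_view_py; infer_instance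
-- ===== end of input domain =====

-- B replaces A's forward overwrite pass with a reverse scan that keeps the first match
-- per field and breaks once all three are found (alternative decomposition; return value only).

-- ===== PORT A =====
-- one iteration of A's loop body (the if/elif chain on the stripped line)
def pvStepA (st : String × String × String) (raw : String) : String × String × String :=
  let line := PySem.Str.strip raw
  if PySem.Str.startswith line "%% Scope:" then
    (PySem.Str.strip (PySem.Str.slice line (some 9) none), st.2.1, st.2.2)
  else if PySem.Str.startswith line "%% View:" then
    (st.1, PySem.Str.strip (PySem.Str.slice line (some 8) none), st.2.2)
  else if PySem.Str.startswith line "%% Part:" then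
    (st.1, st.2.1, PySem.Str.strip (PySem.Str.slice line (some 8) none))
  else st

def extract_scope_view_py (text : String) : String × String × String :=
  (PySem.Str.splitlines text).foldl pvStepA ("", "", "")

-- ===== PORT B =====
-- one iteration of B's loop body: fill a still-None slot if its prefix matches
def pvStepB (s v p : Option String) (raw : String) :
    Option String × Option String × Option String :=
  let line := PySem.Str.strip raw
  if s.isNone && PySem.Str.startswith line "%% Scope:" then
    (some (PySem.Str.strip (PySem.Str.slice line (some 9) none)), v, p)
  else if v.isNone && PySem.Str.startswith line "%% View:" then
    (s, some (PySem.Str.strip (PySem.Str.slice line (some 8) none)), p)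
  else if p.isNone && PySem.Str.startswith line "%% Part:" then
    (s, v, some (PySem.Str.strip (PySem.Str.slice line (some 8) none)))
  else (s, v, p)

-- B's loop over the reversed lines, breaking when all three slots are set
def pvGoB : List String → Option String → Option String → Option String →
    Option String × Option String × Option String
  | [], s, v, p => (s, v, p)
  | raw :: rest, s, v, p =>
    let st := pvStepB s v p raw
    if st.1.isSome && st.2.1.isSome && st.2.2.isSome then st
    else pvGoB rest st.1 st.2.1 st.2.2

def extract_scope_view_py_alt (text : String) : String × String × String :=
  let r := pvGoB (PySem.Str.splitlines text).reverse none none none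
  (r.1.getD "", r.2.1.getD "", r.2.2.getD "")

-- ===== PRECONDITION & SPEC =====
def Spec_extract_scope_view_py (text : String) (out : String × String × String) : Prop := out = extract_scope_view_py_alt text
instance (text : String) (out : String × String × String) : Decidable (Spec_extract_scope_view_py text out) := by unfold Spec_extract_scope_view_py; infer_instance

-- ===== CLAIM (what is proved, stated in full; the proofs are below) =====
def Claim_equal_extract_scope_view_py : Prop := ∀ (text : String), Dom_extract_scope_view_py text → Spec_extract_scope_view_py text (extract_scope_view_py text)

-- ===== LEMMAS AND PROOFS =====

-- the three marker prefixes are mutually exclusive on any line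
theorem pv_not_scope_view (l : String) :
    PySem.Str.startswith l "%% Scope:" = true → PySem.Str.startswith l "%% View:" = true → False := by
  intro h1 h2
  simp only [PySem.Str.startswith_eq, PySem.Chars.startswith_iff] at h1 h2
  obtain ⟨t, ht⟩ := h1
  obtain ⟨u, hu⟩ := h2
  rw [← hu] at ht
  simp at ht

theorem pv_not_scope_part (l : String) :
    PySem.Str.startswith l "%% Scope:" = true → PySem.Str.startswith l "%% Part:" = true → False := by
  intro h1 h2
  simp only [PySem.Str.startswith_eq, PySem.Chars.startswith_iff] at h1 h2
  obtain ⟨t, ht⟩ := h1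
  obtain ⟨u, hu⟩ := h2
  rw [← hu] at ht
  simp at ht

theorem pv_not_view_part (l : String) :
    PySem.Str.startswith l "%% View:" = true → PySem.Str.startswith l "%% Part:" = true → False := by
  intro h1 h2
  simp only [PySem.Str.startswith_eq, PySem.Chars.startswith_iff] at h1 h2
  obtain ⟨t, ht⟩ := h1
  obtain ⟨u, hu⟩ := h2
  rw [← hu] at ht
  simp at ht

-- once all three slots are filled, pvGoB is the identity (the break is harmless)
theorem pvGoB_all_some (l : List String) (s v p : String) :
    pvGoB l (some s) (some v) (some p) = (some s, some v, some p) := by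
  cases l with
  | nil => rfl
  | cons raw rest => simp [pvGoB, pvStepB]

-- pvGoB is compositional over append
theorem pvGoB_append (xs ys : List String) (s v p : Option String) :
    pvGoB (xs ++ ys) s v p =
      pvGoB ys (pvGoB xs s v p).1 (pvGoB xs s v p).2.1 (pvGoB xs s v p).2.2 := by
  induction xs generalizing s v p with
  | nil => rfl
  | cons raw rest ih =>
    simp only [List.cons_append, pvGoB]
    by_cases hb : ((pvStepB s v p raw).1.isSome && (pvStepB s v p raw).2.1.isSome
        && (pvStepB s v p raw).2.2.isSome) = true
    · rw [if_pos hb, if_pos hb]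
      simp only [Bool.and_eq_true, Option.isSome_iff_exists] at hb
      obtain ⟨⟨⟨s', hs'⟩, v', hv'⟩, p', hp'⟩ := hb
      rw [hs', hv', hp', pvGoB_all_some, ← hs', ← hv', ← hp']
    · rw [if_neg hb, if_neg hb, ih]

theorem pvGoB_singleton (raw : String) (s v p : Option String) :
    pvGoB [raw] s v p = pvStepB s v p raw := by
  simp only [pvGoB]
  split <;> rfl

-- one reverse step of B, read through getD, is one forward step of A
theorem pv_key (raw : String) (s v p : Option String) (st : String × String × String) :
    ((pvStepB s v p raw).1.getD st.1, (pvStepB s v p raw).2.1.getD st.2.1,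
      (pvStepB s v p raw).2.2.getD st.2.2) =
    (s.getD (pvStepA st raw).1, v.getD (pvStepA st raw).2.1,
      p.getD (pvStepA st raw).2.2) := by
  obtain ⟨a, b, c⟩ := st
  have hsv := pv_not_scope_view (PySem.Str.strip raw)
  have hsp := pv_not_scope_part (PySem.Str.strip raw)
  have hvp := pv_not_view_part (PySem.Str.strip raw)
  rcases s with _ | s <;> rcases v with _ | v <;> rcases p with _ | p <;>
    by_cases hs : PySem.Str.startswith (PySem.Str.strip raw) "%% Scope:" = true <;>
    by_cases hv : PySem.Str.startswith (PySem.Str.strip raw) "%% View:" = true <;>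
    by_cases hp : PySem.Str.startswith (PySem.Str.strip raw) "%% Part:" = true <;>
    simp_all [pvStepA, pvStepB]

-- main invariant: A's forward fold from (a,b,c) equals B's reverse scan filled with (a,b,c)
theorem pv_main (l : List String) (st : String × String × String) :
    l.foldl pvStepA st =
      ((pvGoB l.reverse none none none).1.getD st.1,
       (pvGoB l.reverse none none none).2.1.getD st.2.1,
       (pvGoB l.reverse none none none).2.2.getD st.2.2) := by
  induction l generalizing st with
  | nil => rfl
  | cons raw rest ih =>
    rw [List.foldl_cons, List.reverse_cons, pvGoB_append rest.reverse [raw],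
        pvGoB_singleton, pv_key]
    exact ih (pvStepA st raw)

-- ===== VERDICT (by name: the statement is the Claim_ definition above) =====
theorem extract_scope_view_py_spec : Claim_equal_extract_scope_view_py := by
  intro text _
  show extract_scope_view_py text = extract_scope_view_py_alt text
  simpa [extract_scope_view_py, extract_scope_view_py_alt] using
    pv_main (PySem.Str.splitlines text) ("", "", "")
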